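-- pv_equiv track=rewrite | github.com/uewquewqueqwue/Yandex-Music-Ym-Handler | re_parsing/parser.py | _fix_symbol
-- ===== SOURCE A (Python) =====
-- def _fix_symbol(item: str | tuple | list) -> list:
--     """corrects the ' character in strings"""
--
--     symbol_case = {
--         "&#39;": "\u0027",
--         "&#8212;": "\u2014",
--         "&#38;": "\u0026",
--         "&#47;": "\u002F",
--         "&#34;": "\u0022",
--     }
--
--     if isinstance(item, str):
--         item = [item]
--
--     for i, j in symbol_case.items():
--         item = list(map(lambda a: a.strip().replace(i, j), item))
--
--     return item
-- ===== SOURCE B (Python) =====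
-- def _fix_symbol(item: str | tuple | list) -> list:
--     """corrects the ' character in strings"""
--
--     symbol_case = {
--         "&#39;": "\u0027",
--         "&#8212;": "\u2014",
--         "&#38;": "\u0026",
--         "&#47;": "\u002F",
--         "&#34;": "\u0022",
--     }
--
--     if isinstance(item, str):
--         item = [item]
--
--     out = []
--     for a in item:
--         s = a.strip()
--         res = []
--         i = 0
--         n = len(s)
--         while i < n:
--             for entity, rep in symbol_case.items():
--                 if s.startswith(entity, i):
--                     res.append(rep)
--                     i += len(entity)
--                     break
--             else:
--                 res.append(s[i])
--                 i += 1
--         out.append("".join(res))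
--     return out
-- ===== Notes on version B (the rewrite author's own statement) =====
-- stated objective: alternative
-- what changed: Replaces five sequential whole-list .strip().replace() passes by one strip and a single left-to-right scan per element that dispatches each matched entity through the table once, so replacement output is never rescanned (fixing A's double-decoding).
-- intended difference: On elements containing the substring '&#38;#47;' or '&#38;#34;', A's '&#38;'->'&' pass creates a fresh entity that a later pass decodes again (A returns e.g. '/' for '&#38;#47;'), while B's single pass returns '&#47;' resp. '&#34;'; not rescanning replacement text is the intended HTML-unescape behaviour. — e.g. on _fix_symbol(["&#38;#47;"]): A returns ["/"], B returns ["&#47;"]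
import Mathlib
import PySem

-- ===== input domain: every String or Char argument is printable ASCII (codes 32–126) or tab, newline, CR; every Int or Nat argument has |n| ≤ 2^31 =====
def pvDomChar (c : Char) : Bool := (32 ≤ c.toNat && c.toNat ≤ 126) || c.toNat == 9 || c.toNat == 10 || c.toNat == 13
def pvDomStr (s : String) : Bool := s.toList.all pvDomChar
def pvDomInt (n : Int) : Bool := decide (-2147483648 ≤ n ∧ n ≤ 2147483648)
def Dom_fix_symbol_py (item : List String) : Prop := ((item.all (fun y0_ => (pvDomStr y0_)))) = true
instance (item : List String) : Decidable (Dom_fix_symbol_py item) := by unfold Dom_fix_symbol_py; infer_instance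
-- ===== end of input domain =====

-- B replaces A's five whole-list strip+replace passes by one strip and a single left-to-right
-- scan per element (entity dispatch via the same table); on elements containing "&#38;#47;" or
-- "&#38;#34;" A decodes twice and B once — stated below as the intended difference D_.

-- ===== PORT A =====
def fix_symbol_py (item : List String) : List String :=
  let symbol_case : PySem.Dict String String :=
    PySem.Dict.ofList
      [("&#39;", "\u0027"), ("&#8212;", "\u2014"), ("&#38;", "\u0026"),
       ("&#47;", "\u002F"), ("&#34;", "\u0022")]
  symbol_case.items.foldl
    (fun it p => it.map (fun a => PySem.Str.replace (PySem.Str.strip a) p.1 p.2)) item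

-- ===== PORT B =====
-- single left-to-right scan of Source B's while-loop: the five s.startswith(entity, i) tests in
-- the table's order, emitting the replacement and skipping the entity on a match
def scanB : List Char → List Char
  | [] => []
  | c :: t =>
    if "&#39;".toList.isPrefixOf (c :: t) then '\'' :: scanB ((c :: t).drop 5)
    else if "&#8212;".toList.isPrefixOf (c :: t) then '\u2014' :: scanB ((c :: t).drop 7)
    else if "&#38;".toList.isPrefixOf (c :: t) then '&' :: scanB ((c :: t).drop 5)
    else if "&#47;".toList.isPrefixOf (c :: t) then '/' :: scanB ((c :: t).drop 5)
    else if "&#34;".toList.isPrefixOf (c :: t) then '"' :: scanB ((c :: t).drop 5)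
    else c :: scanB t
  termination_by l => l.length
  decreasing_by all_goals (simp; try omega)

def fix_symbol_py_alt (item : List String) : List String :=
  item.map (fun a => String.ofList (scanB (PySem.Chars.strip a.toList)))

-- ===== PRECONDITION & SPEC =====
-- On elements containing '&#38;#47;' or '&#38;#34;', A's '&#38;'->'&' pass creates a fresh
-- entity that a later pass decodes again (A returns e.g. '/' for '&#38;#47;'), while B's single
-- pass returns '&#47;' resp. '&#34;'; not rescanning replacement text is the intended behaviour.
def D_fix_symbol_py (item : List String) : Prop :=
  ∃ s ∈ item, ("&#38;#47;".toList <:+: s.toList ∨ "&#38;#34;".toList <:+: s.toList)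
instance (item : List String) : Decidable (D_fix_symbol_py item) := by
  unfold D_fix_symbol_py; infer_instance

def Spec_fix_symbol_py (item : List String) (out : List String) : Prop :=
  ¬ D_fix_symbol_py item → out = fix_symbol_py_alt item
instance (item : List String) (out : List String) : Decidable (Spec_fix_symbol_py item out) := by
  unfold Spec_fix_symbol_py; infer_instance

def pvDiffWitness_fix_symbol_py : List String := ["&#38;#47;"]
def pvDiffWitnessOut_fix_symbol_py : (List String) × (List String) := (["/"], ["&#47;"])

-- ===== CLAIM (what is proved, stated in full; the proofs are below) =====
def Claim_unchanged_fix_symbol_py : Prop :=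
  ∀ (item : List String), Dom_fix_symbol_py item → Spec_fix_symbol_py item (fix_symbol_py item)
def Claim_changed_fix_symbol_py : Prop :=
  Dom_fix_symbol_py (pvDiffWitness_fix_symbol_py) ∧ D_fix_symbol_py (pvDiffWitness_fix_symbol_py) ∧
  fix_symbol_py (pvDiffWitness_fix_symbol_py) = pvDiffWitnessOut_fix_symbol_py.1 ∧
  fix_symbol_py_alt (pvDiffWitness_fix_symbol_py) = pvDiffWitnessOut_fix_symbol_py.2 ∧
  pvDiffWitnessOut_fix_symbol_py.1 ≠ pvDiffWitnessOut_fix_symbol_py.2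
def Claim_exact_fix_symbol_py : Prop :=
  ∀ (item : List String), Dom_fix_symbol_py item → D_fix_symbol_py item →
    fix_symbol_py item ≠ fix_symbol_py_alt item

-- ===== LEMMAS AND PROOFS =====

-- structural model of CPython str.replace (nonempty pattern): scan, on a match emit the
-- replacement and continue after the matched block, never rescanning the replacement
def repl (old new : List Char) : List Char → List Char
  | [] => []
  | c :: t =>
    if old.isPrefixOf (c :: t) ∧ old ≠ [] then new ++ repl old new ((c :: t).drop old.length)
    else c :: repl old new t
  termination_by l => l.length
  decreasing_by
  · rename_i h
    have : old ≠ [] := h.2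
    have : 0 < old.length := List.length_pos_of_ne_nil this
    simp; omega
  · simp

lemma repl_nil (old new : List Char) : repl old new [] = [] := by simp [repl]

lemma repl_skip (old new : List Char) (c : Char) (t : List Char) (h : ¬ old <+: c :: t) :
    repl old new (c :: t) = c :: repl old new t := by
  rw [repl]
  rw [if_neg]
  rintro ⟨h1, -⟩
  exact h (List.isPrefixOf_iff_prefix.mp h1)

lemma repl_match (old new rest : List Char) (hold : old ≠ []) :
    repl old new (old ++ rest) = new ++ repl old new rest := by
  obtain ⟨c, o, rfl⟩ := List.exists_cons_of_ne_nil hold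
  rw [show (c :: o) ++ rest = c :: (o ++ rest) from rfl, repl]
  rw [if_pos ⟨List.isPrefixOf_iff_prefix.mpr ⟨rest, rfl⟩, hold⟩]
  congr 1
  rw [show c :: (o ++ rest) = (c :: o) ++ rest from rfl, List.drop_left]

lemma go_eq (old new : List Char) (hold : old ≠ []) :
    ∀ (fuel : Nat) (l acc : List Char), l.length ≤ fuel →
      PySem.Chars.replace.go old new fuel l acc = acc.reverse ++ repl old new l := by
  intro fuel
  induction fuel with
  | zero =>
    intro l acc h
    have : l = [] := List.eq_nil_of_length_eq_zero (Nat.le_zero.mp h)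
    subst this
    simp [PySem.Chars.replace.go, repl_nil]
  | succ n ih =>
    intro l acc h
    cases l with
    | nil => simp [PySem.Chars.replace.go, repl_nil]
    | cons c t =>
      by_cases hp : old.isPrefixOf (c :: t)
      · have hpre : old <+: c :: t := List.isPrefixOf_iff_prefix.mp hp
        obtain ⟨rest, hrest⟩ := hpre
        rw [PySem.Chars.replace.go]
        simp only [hp, if_true]
        have hlen : (List.drop old.length (c :: t)).length ≤ n := by
          have h1 : 0 < old.length := List.length_pos_of_ne_nil hold
          simp at h ⊢
          omega
        rw [ih _ _ hlen, ← hrest, repl_match old new rest hold, List.drop_left]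
        simp
      · rw [PySem.Chars.replace.go]
        simp only [hp]
        have hlen : t.length ≤ n := by simp at h; omega
        rw [ih _ _ hlen, repl_skip old new c t (fun hc => hp (List.isPrefixOf_iff_prefix.mpr hc))]
        simp

lemma replace_eq_repl (old new s : List Char) (hold : old ≠ []) :
    PySem.Chars.replace s old new = repl old new s := by
  unfold PySem.Chars.replace
  rw [if_neg (by simpa using hold)]
  simpa using go_eq old new hold s.length s [] le_rfl

lemma repl_eq_nil_iff (old new : List Char) (hnew : new ≠ []) (t : List Char) :
    repl old new t = [] ↔ t = [] := by
  cases t with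
  | nil => simp [repl_nil]
  | cons c t' =>
    constructor
    · intro h
      rw [repl] at h
      split at h
      · simp [hnew] at h
      · simp at h
    · intro h; simp at h

-- x never contains the replacement char ⇒ a prefix of the replaced string was a prefix before
lemma prefix_transfer (old : List Char) (hold : old ≠ []) (ch : Char) :
    ∀ (s x : List Char), ch ∉ x → x <+: repl old [ch] s → x <+: s := by
  intro s
  induction s using repl.induct old with
  | case1 =>
    intro x _ h
    rw [repl_nil] at h
    exact h
  | case2 c t hmatch ih =>
    intro x hch h
    rw [repl, if_pos hmatch] at h
    cases x with
    | nil => exact List.nil_prefix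
    | cons x0 x' =>
      rw [List.singleton_append, List.cons_prefix_cons] at h
      obtain ⟨rfl, -⟩ := h
      simp at hch
  | case3 c t hnm ih =>
    intro x hch h
    rw [repl, if_neg hnm] at h
    cases x with
    | nil => exact List.nil_prefix
    | cons x0 x' =>
      rw [List.cons_prefix_cons] at h ⊢
      exact ⟨h.1, ih x' (fun hm => hch (List.mem_cons_of_mem _ hm)) h.2⟩


lemma amp_create (x4 : List Char) (hx : '&' ∉ x4) (s : List Char)
    (h : ('&' :: x4) <+: repl ['&','#','3','8',';'] ['&'] s) :
    ('&' :: x4) <+: s ∨ (['&','#','3','8',';'] ++ x4) <+: s := by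
  cases s with
  | nil => rw [repl_nil] at h; simp at h
  | cons c t =>
    by_cases hp : ['&','#','3','8',';'] <+: c :: t
    · obtain ⟨rest, hrest⟩ := hp
      rw [← hrest, repl_match _ _ _ (by decide), List.singleton_append,
        List.cons_prefix_cons] at h
      have h2 := prefix_transfer ['&','#','3','8',';'] (by decide) '&' rest x4 hx h.2
      right
      obtain ⟨r2, hr2⟩ := h2
      rw [← hrest, ← hr2]
      exact ⟨r2, by simp⟩
    · rw [repl_skip _ _ _ _ hp, List.cons_prefix_cons] at h
      left
      rw [List.cons_prefix_cons]
      exact ⟨h.1, prefix_transfer ['&','#','3','8',';'] (by decide) '&' t x4 hx h.2⟩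

-- ---- strip facts ----

lemma strip_as_drops (u : List Char) :
    PySem.Chars.strip u = (List.dropWhile PySem.Chars.isspace u).rdropWhile PySem.Chars.isspace := rfl

lemma strip_infix (u : List Char) : PySem.Chars.strip u <:+: u := by
  rw [strip_as_drops]
  exact (List.rdropWhile_prefix _ _).isInfix.trans (List.dropWhile_suffix _).isInfix

lemma strip_head?_not (u : List Char) (x : Char)
    (h : (PySem.Chars.strip u).head? = some x) : PySem.Chars.isspace x = false := by
  rw [strip_as_drops] at h
  have hne : (List.dropWhile PySem.Chars.isspace u).rdropWhile PySem.Chars.isspace ≠ [] := by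
    intro h0; rw [h0] at h; simp at h
  have hd : List.dropWhile PySem.Chars.isspace u ≠ [] := by
    intro h0; rw [h0] at hne; simp [List.rdropWhile] at hne
  have hx : x = (List.dropWhile PySem.Chars.isspace u).head hd := by
    rw [← List.IsPrefix.head (List.rdropWhile_prefix _ _) hne]
    rw [List.head?_eq_head hne] at h
    exact (Option.some.inj h).symm
  rw [hx]
  exact List.head_dropWhile_not _ _

lemma strip_getLast?_not (u : List Char) (x : Char)
    (h : (PySem.Chars.strip u).getLast? = some x) : PySem.Chars.isspace x = false := by
  rw [strip_as_drops] at h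
  have hne : (List.dropWhile PySem.Chars.isspace u).rdropWhile PySem.Chars.isspace ≠ [] := by
    intro h0; rw [h0] at h; simp at h
  rw [List.getLast?_eq_getLast hne] at h
  have := List.rdropWhile_last_not PySem.Chars.isspace (List.dropWhile PySem.Chars.isspace u) hne
  rw [← Option.some.inj h]
  simpa using this

lemma strip_eq_self (t : List Char)
    (h1 : ∀ x, t.head? = some x → PySem.Chars.isspace x = false)
    (h2 : ∀ x, t.getLast? = some x → PySem.Chars.isspace x = false) :
    PySem.Chars.strip t = t := by
  rw [strip_as_drops]
  have hd : List.dropWhile PySem.Chars.isspace t = t := by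
    rw [List.dropWhile_eq_self_iff]
    intro hl
    have hne : t ≠ [] := by cases t <;> simp_all
    have := h1 (t.head hne) (List.head?_eq_head hne)
    rw [show t[0] = t.head hne from by
      cases t with | nil => exact absurd rfl hne | cons a b => rfl, this]
    simp
  rw [hd, List.rdropWhile_eq_self_iff]
  intro hne
  rw [h2 (t.getLast hne) (List.getLast?_eq_getLast hne)]
  simp

lemma strip_strip (u : List Char) :
    PySem.Chars.strip (PySem.Chars.strip u) = PySem.Chars.strip u :=
  strip_eq_self _ (strip_head?_not u) (strip_getLast?_not u)

lemma repl_head? (old : List Char) (c : Char) (t : List Char) :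
    (repl old [c] t).head? = none ∨ (repl old [c] t).head? = some c ∨
    (repl old [c] t).head? = t.head? := by
  cases t with
  | nil => left; rw [repl_nil]; rfl
  | cons c' t' =>
    rw [repl]
    split
    · right; left; rfl
    · right; right; rfl

lemma repl_last?_aux (old : List Char) (c : Char) (hc : PySem.Chars.isspace c = false) :
    ∀ (t : List Char), (∀ x, t.getLast? = some x → PySem.Chars.isspace x = false) →
      ∀ x, (repl old [c] t).getLast? = some x → PySem.Chars.isspace x = false := by
  intro t
  induction t using repl.induct old with
  | case1 =>
    intro _ x hx
    rw [repl_nil] at hx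
    simp at hx
  | case2 c' t' hmatch ih =>
    intro hlast x hx
    rw [repl, if_pos hmatch, List.singleton_append] at hx
    rcases hr : repl old [c] (List.drop old.length (c' :: t')) with _ | ⟨y, ys⟩
    · rw [hr] at hx
      simp at hx
      rw [← hx]; exact hc
    · rw [hr, List.getLast?_cons_cons] at hx
      rw [← hr] at hx
      refine ih ?_ x hx
      intro z hz
      have hd : List.drop old.length (c' :: t') ≠ [] := by
        intro h0; rw [h0, repl_nil] at hr; simp at hr
      obtain ⟨w, hw⟩ := List.drop_suffix old.length (c' :: t')
      have hgl := List.getLast?_append_of_ne_nil w (l₂ := List.drop old.length (c' :: t')) hd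
      rw [hw] at hgl
      exact hlast z (by rw [hgl]; exact hz)
  | case3 c' t' hnm ih =>
    intro hlast x hx
    rw [repl, if_neg hnm] at hx
    rcases hr : repl old [c] t' with _ | ⟨y, ys⟩
    · rw [hr] at hx
      simp at hx
      have ht' : t' = [] := (repl_eq_nil_iff old [c] (by simp) t').mp hr
      subst ht'
      exact hlast x (by simpa using hx)
    · rw [hr, List.getLast?_cons_cons, ← hr] at hx
      refine ih ?_ x hx
      intro z hz
      have ht' : t' ≠ [] := by
        intro h0; rw [h0, repl_nil] at hr; simp at hr
      apply hlast z
      rw [show (c' :: t').getLast? = t'.getLast? from by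
        cases t' with | nil => exact absurd rfl ht' | cons a b => rw [List.getLast?_cons_cons]]
      exact hz

lemma repl_stripped (old : List Char) (c : Char) (hc : PySem.Chars.isspace c = false)
    (t : List Char) (ht : PySem.Chars.strip t = t) :
    PySem.Chars.strip (repl old [c] t) = repl old [c] t := by
  apply strip_eq_self
  · intro x hx
    rcases repl_head? old c t with h | h | h
    · rw [h] at hx; simp at hx
    · rw [h] at hx
      rw [← Option.some.inj hx]; exact hc
    · rw [h] at hx
      exact strip_head?_not t x (by rwa [ht])
  · apply repl_last?_aux old c hc t
    intro z hz
    exact strip_getLast?_not t z (by rwa [ht])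

-- toList of the five entity strings, for simp
lemma tl39 : "&#39;".toList = ['&','#','3','9',';'] := rfl
lemma tl8212 : "&#8212;".toList = ['&','#','8','2','1','2',';'] := rfl
lemma tl38 : "&#38;".toList = ['&','#','3','8',';'] := rfl
lemma tl47 : "&#47;".toList = ['&','#','4','7',';'] := rfl
lemma tl34 : "&#34;".toList = ['&','#','3','4',';'] := rfl
lemma tlA : "\u0027".toList = ['\''] := rfl
lemma tlB : "\u2014".toList = ['\u2014'] := rfl
lemma tlC : "\u0026".toList = ['&'] := rfl
lemma tlD : "\u002F".toList = ['/'] := rfl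
lemma tlE : "\u0022".toList = ['"'] := rfl

lemma not_prefix_of_not_isPrefixOf {l₁ l₂ : List Char} (h : ¬ l₁.isPrefixOf l₂ = true) :
    ¬ l₁ <+: l₂ := fun hp => h (List.isPrefixOf_iff_prefix.mpr hp)

-- A's chain of the five passes, as one definition
def chainA (s : List Char) : List Char :=
  repl ['&','#','3','4',';'] ['"']
    (repl ['&','#','4','7',';'] ['/']
      (repl ['&','#','3','8',';'] ['&']
        (repl ['&','#','8','2','1','2',';'] ['\u2014']
          (repl ['&','#','3','9',';'] ['\''] s))))

-- the heart: A's five sequential passes agree with B's single scan unless the input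
-- contains "&#38;#47;" or "&#38;#34;"; there A's output is strictly shorter.
theorem chain_scan_main : ∀ (s : List Char),
    ((¬ ['&','#','3','8',';','#','4','7',';'] <:+: s →
      ¬ ['&','#','3','8',';','#','3','4',';'] <:+: s →
      chainA s = scanB s) ∧
     (chainA s).length ≤ (scanB s).length) ∧
    ((['&','#','3','8',';','#','4','7',';'] <:+: s ∨
      ['&','#','3','8',';','#','3','4',';'] <:+: s) →
     (chainA s).length < (scanB s).length) := by
  intro s
  induction s using scanB.induct with
  | case1 =>
    refine ⟨⟨fun _ _ => by simp [chainA, repl_nil, scanB],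
      by simp [chainA, repl_nil, scanB]⟩, fun hb => ?_⟩
    rcases hb with h | h <;> simp at h
  | case2 c t hp ih =>
    rw [tl39] at hp
    obtain ⟨rest, hrest⟩ := List.isPrefixOf_iff_prefix.mp hp
    have hct : c :: t = '&'::'#'::'3'::'9'::';'::rest := hrest.symm
    have hdrop : List.drop 5 (c :: t) = rest := by rw [hct]; rfl
    rw [hdrop] at ih
    have hmono : ∀ x : List Char, x <:+: rest → x <:+: c :: t := by
      intro x hx
      rw [hct]
      exact hx.trans (List.IsSuffix.isInfix ⟨['&','#','3','9',';'], rfl⟩)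
    have L : chainA (c :: t) = '\'' :: chainA rest := by
      rw [hct]; simp [chainA, repl, List.isPrefixOf]
    have S : scanB (c :: t) = '\'' :: scanB rest := by
      rw [hct]; simp [scanB, List.isPrefixOf]
    have h47t : ['&','#','3','8',';','#','4','7',';'] <:+: c :: t →
        ['&','#','3','8',';','#','4','7',';'] <:+: rest := by
      rw [hct]; intro h
      simp only [List.infix_cons_iff, List.cons_prefix_cons] at h
      simpa using h
    have h34t : ['&','#','3','8',';','#','3','4',';'] <:+: c :: t →
        ['&','#','3','8',';','#','3','4',';'] <:+: rest := by
      rw [hct]; intro h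
      simp only [List.infix_cons_iff, List.cons_prefix_cons] at h
      simpa using h
    refine ⟨⟨fun hn47 hn34 => ?_, ?_⟩, fun hb => ?_⟩
    · rw [L, S]
      exact congrArg _ (ih.1.1 (fun h => hn47 (hmono _ h)) (fun h => hn34 (hmono _ h)))
    · rw [L, S]; simp only [List.length_cons]; exact Nat.succ_le_succ ih.1.2
    · rw [L, S]; simp only [List.length_cons]
      exact Nat.succ_lt_succ (ih.2 (hb.imp h47t h34t))
  | case3 c t h1 hp ih =>
    rw [tl8212] at hp
    obtain ⟨rest, hrest⟩ := List.isPrefixOf_iff_prefix.mp hp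
    have hct : c :: t = '&'::'#'::'8'::'2'::'1'::'2'::';'::rest := hrest.symm
    have hdrop : List.drop 7 (c :: t) = rest := by rw [hct]; rfl
    rw [hdrop] at ih
    have hmono : ∀ x : List Char, x <:+: rest → x <:+: c :: t := by
      intro x hx
      rw [hct]
      exact hx.trans (List.IsSuffix.isInfix ⟨['&','#','8','2','1','2',';'], rfl⟩)
    have L : chainA (c :: t) = '\u2014' :: chainA rest := by
      rw [hct]; simp [chainA, repl, List.isPrefixOf]
    have S : scanB (c :: t) = '\u2014' :: scanB rest := by
      rw [hct]; simp [scanB, List.isPrefixOf]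
    have h47t : ['&','#','3','8',';','#','4','7',';'] <:+: c :: t →
        ['&','#','3','8',';','#','4','7',';'] <:+: rest := by
      rw [hct]; intro h
      simp only [List.infix_cons_iff, List.cons_prefix_cons] at h
      simpa using h
    have h34t : ['&','#','3','8',';','#','3','4',';'] <:+: c :: t →
        ['&','#','3','8',';','#','3','4',';'] <:+: rest := by
      rw [hct]; intro h
      simp only [List.infix_cons_iff, List.cons_prefix_cons] at h
      simpa using h
    refine ⟨⟨fun hn47 hn34 => ?_, ?_⟩, fun hb => ?_⟩
    · rw [L, S]
      exact congrArg _ (ih.1.1 (fun h => hn47 (hmono _ h)) (fun h => hn34 (hmono _ h)))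
    · rw [L, S]; simp only [List.length_cons]; exact Nat.succ_le_succ ih.1.2
    · rw [L, S]; simp only [List.length_cons]
      exact Nat.succ_lt_succ (ih.2 (hb.imp h47t h34t))
  | case4 c t h1 h2 hp ih =>
    rw [tl38] at hp
    obtain ⟨rest, hrest⟩ := List.isPrefixOf_iff_prefix.mp hp
    have hct : c :: t = '&'::'#'::'3'::'8'::';'::rest := hrest.symm
    have hdrop : List.drop 5 (c :: t) = rest := by rw [hct]; rfl
    rw [hdrop] at ih
    by_cases hs47 : ['#','4','7',';'] <+: rest
    · obtain ⟨r2, hr2⟩ := hs47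
      have hct9 : c :: t = '&'::'#'::'3'::'8'::';'::'#'::'4'::'7'::';'::r2 := by
        rw [hct, ← hr2]; rfl
      have L : chainA (c :: t) = '/' :: chainA r2 := by
        rw [hct9]; simp [chainA, repl, List.isPrefixOf]
      have S : scanB (c :: t) = '&'::'#'::'4'::'7'::';':: scanB r2 := by
        rw [hct9]; simp [scanB, List.isPrefixOf]
      have Lr : chainA rest = '#'::'4'::'7'::';':: chainA r2 := by
        rw [← hr2]; simp [chainA, repl, List.isPrefixOf]
      have Sr : scanB rest = '#'::'4'::'7'::';':: scanB r2 := by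
        rw [← hr2]; simp [scanB, List.isPrefixOf]
      have hbad : ['&','#','3','8',';','#','4','7',';'] <:+: c :: t := by
        rw [hct9]; exact ⟨[], r2, rfl⟩
      have e1 := congrArg List.length L
      have e2 := congrArg List.length S
      have e3 := congrArg List.length Lr
      have e4 := congrArg List.length Sr
      have e5 := ih.1.2
      simp only [List.length_cons] at e1 e2 e3 e4
      exact ⟨⟨fun hn47 _ => absurd hbad hn47, by omega⟩, fun _ => by omega⟩
    · by_cases hs34 : ['#','3','4',';'] <+: rest
      · obtain ⟨r2, hr2⟩ := hs34
        have hct9 : c :: t = '&'::'#'::'3'::'8'::';'::'#'::'3'::'4'::';'::r2 := by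
          rw [hct, ← hr2]; rfl
        have L : chainA (c :: t) = '"' :: chainA r2 := by
          rw [hct9]; simp [chainA, repl, List.isPrefixOf]
        have S : scanB (c :: t) = '&'::'#'::'3'::'4'::';':: scanB r2 := by
          rw [hct9]; simp [scanB, List.isPrefixOf]
        have Lr : chainA rest = '#'::'3'::'4'::';':: chainA r2 := by
          rw [← hr2]; simp [chainA, repl, List.isPrefixOf]
        have Sr : scanB rest = '#'::'3'::'4'::';':: scanB r2 := by
          rw [← hr2]; simp [scanB, List.isPrefixOf]
        have hbad : ['&','#','3','8',';','#','3','4',';'] <:+: c :: t := by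
          rw [hct9]; exact ⟨[], r2, rfl⟩
        have e1 := congrArg List.length L
        have e2 := congrArg List.length S
        have e3 := congrArg List.length Lr
        have e4 := congrArg List.length Sr
        have e5 := ih.1.2
        simp only [List.length_cons] at e1 e2 e3 e4
        exact ⟨⟨fun _ hn34 => absurd hbad hn34, by omega⟩, fun _ => by omega⟩
      · have Lb : repl ['&','#','3','8',';'] ['&']
            (repl ['&','#','8','2','1','2',';'] ['\u2014']
              (repl ['&','#','3','9',';'] ['\''] (c :: t))) =
            '&' :: repl ['&','#','3','8',';'] ['&']
              (repl ['&','#','8','2','1','2',';'] ['\u2014']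
                (repl ['&','#','3','9',';'] ['\''] rest)) := by
          rw [hct]; simp [repl, List.isPrefixOf]
        have hn47 : ¬ ['&','#','4','7',';'] <+: '&' ::
            repl ['&','#','3','8',';'] ['&']
              (repl ['&','#','8','2','1','2',';'] ['\u2014']
                (repl ['&','#','3','9',';'] ['\''] rest)) := by
          intro hpre
          rw [List.cons_prefix_cons] at hpre
          have t1 := prefix_transfer ['&','#','3','8',';'] (by decide) '&' _ _ (by decide) hpre.2
          have t2 := prefix_transfer ['&','#','8','2','1','2',';'] (by decide) '\u2014' _ _ (by decide) t1
          have t3 := prefix_transfer ['&','#','3','9',';'] (by decide) '\'' _ _ (by decide) t2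
          exact hs47 t3
        have hn34 : ¬ ['&','#','3','4',';'] <+: '&' ::
            repl ['&','#','4','7',';'] ['/']
              (repl ['&','#','3','8',';'] ['&']
                (repl ['&','#','8','2','1','2',';'] ['\u2014']
                  (repl ['&','#','3','9',';'] ['\''] rest))) := by
          intro hpre
          rw [List.cons_prefix_cons] at hpre
          have t0 := prefix_transfer ['&','#','4','7',';'] (by decide) '/' _ _ (by decide) hpre.2
          have t1 := prefix_transfer ['&','#','3','8',';'] (by decide) '&' _ _ (by decide) t0
          have t2 := prefix_transfer ['&','#','8','2','1','2',';'] (by decide) '\u2014' _ _ (by decide) t1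
          have t3 := prefix_transfer ['&','#','3','9',';'] (by decide) '\'' _ _ (by decide) t2
          exact hs34 t3
        have L : chainA (c :: t) = '&' :: chainA rest := by
          unfold chainA
          rw [Lb, repl_skip _ _ _ _ hn47, repl_skip _ _ _ _ hn34]
        have S : scanB (c :: t) = '&' :: scanB rest := by
          rw [hct]; simp [scanB, List.isPrefixOf]
        have hmono : ∀ x : List Char, x <:+: rest → x <:+: c :: t := by
          intro x hx
          rw [hct]
          exact hx.trans (List.IsSuffix.isInfix ⟨['&','#','3','8',';'], rfl⟩)
        have h47t : ['&','#','3','8',';','#','4','7',';'] <:+: c :: t →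
            ['&','#','3','8',';','#','4','7',';'] <:+: rest := by
          rw [hct]; intro h
          simp only [List.infix_cons_iff, List.cons_prefix_cons] at h
          rcases (by simpa using h :
              ['#','4','7',';'] <+: rest ∨ ['&','#','3','8',';','#','4','7',';'] <:+: rest) with h' | h'
          · exact absurd h' hs47
          · exact h'
        have h34t : ['&','#','3','8',';','#','3','4',';'] <:+: c :: t →
            ['&','#','3','8',';','#','3','4',';'] <:+: rest := by
          rw [hct]; intro h
          simp only [List.infix_cons_iff, List.cons_prefix_cons] at h
          rcases (by simpa using h :
              ['#','3','4',';'] <+: rest ∨ ['&','#','3','8',';','#','3','4',';'] <:+: rest) with h' | h'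
          · exact absurd h' hs34
          · exact h'
        refine ⟨⟨fun hn47' hn34' => ?_, ?_⟩, fun hb => ?_⟩
        · rw [L, S]
          exact congrArg _ (ih.1.1 (fun h => hn47' (hmono _ h)) (fun h => hn34' (hmono _ h)))
        · rw [L, S]; simp only [List.length_cons]; exact Nat.succ_le_succ ih.1.2
        · rw [L, S]; simp only [List.length_cons]
          exact Nat.succ_lt_succ (ih.2 (hb.imp h47t h34t))
  | case5 c t h1 h2 h3 hp ih =>
    rw [tl47] at hp
    obtain ⟨rest, hrest⟩ := List.isPrefixOf_iff_prefix.mp hp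
    have hct : c :: t = '&'::'#'::'4'::'7'::';'::rest := hrest.symm
    have hdrop : List.drop 5 (c :: t) = rest := by rw [hct]; rfl
    rw [hdrop] at ih
    have hmono : ∀ x : List Char, x <:+: rest → x <:+: c :: t := by
      intro x hx
      rw [hct]
      exact hx.trans (List.IsSuffix.isInfix ⟨['&','#','4','7',';'], rfl⟩)
    have L : chainA (c :: t) = '/' :: chainA rest := by
      rw [hct]; simp [chainA, repl, List.isPrefixOf]
    have S : scanB (c :: t) = '/' :: scanB rest := by
      rw [hct]; simp [scanB, List.isPrefixOf]
    have h47t : ['&','#','3','8',';','#','4','7',';'] <:+: c :: t →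
        ['&','#','3','8',';','#','4','7',';'] <:+: rest := by
      rw [hct]; intro h
      simp only [List.infix_cons_iff, List.cons_prefix_cons] at h
      simpa using h
    have h34t : ['&','#','3','8',';','#','3','4',';'] <:+: c :: t →
        ['&','#','3','8',';','#','3','4',';'] <:+: rest := by
      rw [hct]; intro h
      simp only [List.infix_cons_iff, List.cons_prefix_cons] at h
      simpa using h
    refine ⟨⟨fun hn47 hn34 => ?_, ?_⟩, fun hb => ?_⟩
    · rw [L, S]
      exact congrArg _ (ih.1.1 (fun h => hn47 (hmono _ h)) (fun h => hn34 (hmono _ h)))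
    · rw [L, S]; simp only [List.length_cons]; exact Nat.succ_le_succ ih.1.2
    · rw [L, S]; simp only [List.length_cons]
      exact Nat.succ_lt_succ (ih.2 (hb.imp h47t h34t))
  | case6 c t h1 h2 h3 h4 hp ih =>
    rw [tl34] at hp
    obtain ⟨rest, hrest⟩ := List.isPrefixOf_iff_prefix.mp hp
    have hct : c :: t = '&'::'#'::'3'::'4'::';'::rest := hrest.symm
    have hdrop : List.drop 5 (c :: t) = rest := by rw [hct]; rfl
    rw [hdrop] at ih
    have hmono : ∀ x : List Char, x <:+: rest → x <:+: c :: t := by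
      intro x hx
      rw [hct]
      exact hx.trans (List.IsSuffix.isInfix ⟨['&','#','3','4',';'], rfl⟩)
    have L : chainA (c :: t) = '"' :: chainA rest := by
      rw [hct]; simp [chainA, repl, List.isPrefixOf]
    have S : scanB (c :: t) = '"' :: scanB rest := by
      rw [hct]; simp [scanB, List.isPrefixOf]
    have h47t : ['&','#','3','8',';','#','4','7',';'] <:+: c :: t →
        ['&','#','3','8',';','#','4','7',';'] <:+: rest := by
      rw [hct]; intro h
      simp only [List.infix_cons_iff, List.cons_prefix_cons] at h
      simpa using h
    have h34t : ['&','#','3','8',';','#','3','4',';'] <:+: c :: t →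
        ['&','#','3','8',';','#','3','4',';'] <:+: rest := by
      rw [hct]; intro h
      simp only [List.infix_cons_iff, List.cons_prefix_cons] at h
      simpa using h
    refine ⟨⟨fun hn47 hn34 => ?_, ?_⟩, fun hb => ?_⟩
    · rw [L, S]
      exact congrArg _ (ih.1.1 (fun h => hn47 (hmono _ h)) (fun h => hn34 (hmono _ h)))
    · rw [L, S]; simp only [List.length_cons]; exact Nat.succ_le_succ ih.1.2
    · rw [L, S]; simp only [List.length_cons]
      exact Nat.succ_lt_succ (ih.2 (hb.imp h47t h34t))
  | case7 c t h1 h2 h3 h4 h5 ih =>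
    rw [tl39] at h1; rw [tl8212] at h2; rw [tl38] at h3; rw [tl47] at h4; rw [tl34] at h5
    have e1 : repl ['&','#','3','9',';'] ['\''] (c :: t) =
        c :: repl ['&','#','3','9',';'] ['\''] t :=
      repl_skip _ _ _ _ (not_prefix_of_not_isPrefixOf h1)
    have e2 : repl ['&','#','8','2','1','2',';'] ['\u2014']
        (c :: repl ['&','#','3','9',';'] ['\''] t) =
        c :: repl ['&','#','8','2','1','2',';'] ['\u2014'] (repl ['&','#','3','9',';'] ['\''] t) := by
      apply repl_skip
      intro hpre
      rw [← e1] at hpre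
      exact not_prefix_of_not_isPrefixOf h2
        (prefix_transfer ['&','#','3','9',';'] (by decide) '\'' _ _ (by decide) hpre)
    have e3 : repl ['&','#','3','8',';'] ['&']
        (c :: repl ['&','#','8','2','1','2',';'] ['\u2014'] (repl ['&','#','3','9',';'] ['\''] t)) =
        c :: repl ['&','#','3','8',';'] ['&']
          (repl ['&','#','8','2','1','2',';'] ['\u2014'] (repl ['&','#','3','9',';'] ['\''] t)) := by
      apply repl_skip
      intro hpre
      rw [← e2, ← e1] at hpre
      have u1 := prefix_transfer ['&','#','8','2','1','2',';'] (by decide) '\u2014' _ _ (by decide) hpre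
      have u2 := prefix_transfer ['&','#','3','9',';'] (by decide) '\'' _ _ (by decide) u1
      exact not_prefix_of_not_isPrefixOf h3 u2
    have e4 : repl ['&','#','4','7',';'] ['/']
        (c :: repl ['&','#','3','8',';'] ['&']
          (repl ['&','#','8','2','1','2',';'] ['\u2014'] (repl ['&','#','3','9',';'] ['\''] t))) =
        c :: repl ['&','#','4','7',';'] ['/']
          (repl ['&','#','3','8',';'] ['&']
            (repl ['&','#','8','2','1','2',';'] ['\u2014'] (repl ['&','#','3','9',';'] ['\''] t))) := by
      apply repl_skip
      intro hpre
      rw [← e3, ← e2, ← e1] at hpre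
      rcases amp_create ['#','4','7',';'] (by decide) _ hpre with hc | hc
      · have u1 := prefix_transfer ['&','#','8','2','1','2',';'] (by decide) '\u2014' _ _ (by decide) hc
        have u2 := prefix_transfer ['&','#','3','9',';'] (by decide) '\'' _ _ (by decide) u1
        exact not_prefix_of_not_isPrefixOf h4 u2
      · have u1 := prefix_transfer ['&','#','8','2','1','2',';'] (by decide) '\u2014' _ _ (by decide) hc
        have u2 := prefix_transfer ['&','#','3','9',';'] (by decide) '\'' _ _ (by decide) u1
        exact not_prefix_of_not_isPrefixOf h3
          (List.IsPrefix.trans (by decide) u2)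
    have e5 : repl ['&','#','3','4',';'] ['"']
        (c :: repl ['&','#','4','7',';'] ['/']
          (repl ['&','#','3','8',';'] ['&']
            (repl ['&','#','8','2','1','2',';'] ['\u2014'] (repl ['&','#','3','9',';'] ['\''] t)))) =
        c :: repl ['&','#','3','4',';'] ['"']
          (repl ['&','#','4','7',';'] ['/']
            (repl ['&','#','3','8',';'] ['&']
              (repl ['&','#','8','2','1','2',';'] ['\u2014'] (repl ['&','#','3','9',';'] ['\''] t)))) := by
      apply repl_skip
      intro hpre
      rw [← e4, ← e3, ← e2, ← e1] at hpre
      have u0 := prefix_transfer ['&','#','4','7',';'] (by decide) '/' _ _ (by decide) hpre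
      rcases amp_create ['#','3','4',';'] (by decide) _ u0 with hc | hc
      · have u1 := prefix_transfer ['&','#','8','2','1','2',';'] (by decide) '\u2014' _ _ (by decide) hc
        have u2 := prefix_transfer ['&','#','3','9',';'] (by decide) '\'' _ _ (by decide) u1
        exact not_prefix_of_not_isPrefixOf h5 u2
      · have u1 := prefix_transfer ['&','#','8','2','1','2',';'] (by decide) '\u2014' _ _ (by decide) hc
        have u2 := prefix_transfer ['&','#','3','9',';'] (by decide) '\'' _ _ (by decide) u1
        exact not_prefix_of_not_isPrefixOf h3
          (List.IsPrefix.trans (by decide) u2)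
    have L : chainA (c :: t) = c :: chainA t := by
      unfold chainA
      rw [e1, e2, e3, e4, e5]
    have S : scanB (c :: t) = c :: scanB t := by
      rw [scanB]
      simp only [tl39, tl8212, tl38, tl47, tl34] at h1 h2 h3 h4 h5 ⊢
      rw [if_neg h1, if_neg h2, if_neg h3, if_neg h4, if_neg h5]
    have hmono : ∀ x : List Char, x <:+: t → x <:+: c :: t :=
      fun x hx => hx.trans (List.IsSuffix.isInfix ⟨[c], rfl⟩)
    have h47t : ['&','#','3','8',';','#','4','7',';'] <:+: c :: t →
        ['&','#','3','8',';','#','4','7',';'] <:+: t := by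
      intro h
      rcases List.infix_cons_iff.mp h with hpr | h'
      · exact absurd (List.isPrefixOf_iff_prefix.mpr (List.IsPrefix.trans (by decide) hpr)) h3
      · exact h'
    have h34t : ['&','#','3','8',';','#','3','4',';'] <:+: c :: t →
        ['&','#','3','8',';','#','3','4',';'] <:+: t := by
      intro h
      rcases List.infix_cons_iff.mp h with hpr | h'
      · exact absurd (List.isPrefixOf_iff_prefix.mpr (List.IsPrefix.trans (by decide) hpr)) h3
      · exact h'
    refine ⟨⟨fun hn47 hn34 => ?_, ?_⟩, fun hb => ?_⟩
    · rw [L, S]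
      exact congrArg _ (ih.1.1 (fun h => hn47 (hmono _ h)) (fun h => hn34 (hmono _ h)))
    · rw [L, S]; simp only [List.length_cons]; exact Nat.succ_le_succ ih.1.2
    · rw [L, S]; simp only [List.length_cons]
      exact Nat.succ_lt_succ (ih.2 (hb.imp h47t h34t))

theorem chain_eq_scan (s : List Char)
    (h47 : ¬ ['&','#','3','8',';','#','4','7',';'] <:+: s)
    (h34 : ¬ ['&','#','3','8',';','#','3','4',';'] <:+: s) :
    chainA s = scanB s := (chain_scan_main s).1.1 h47 h34

theorem chain_lt (s : List Char)
    (h : ['&','#','3','8',';','#','4','7',';'] <:+: s ∨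
         ['&','#','3','8',';','#','3','4',';'] <:+: s) :
    (chainA s).length < (scanB s).length := (chain_scan_main s).2 h

-- an infix whose first and last characters are not whitespace survives .strip()
lemma infix_dropWhileX (q : Char → Bool) (x : List Char) (hne : x ≠ [])
    (hh : q (x.head hne) = false) : ∀ u, x <:+: u → x <:+: u.dropWhile q := by
  intro u
  induction u with
  | nil => intro h; simpa using h
  | cons a u' ih =>
    intro h
    by_cases hqa : q a = true
    · rw [List.dropWhile_cons_of_pos hqa]
      rcases List.infix_cons_iff.mp h with hp | hi
      · exfalso
        cases x with
        | nil => exact hne rfl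
        | cons x0 x'' =>
          rw [List.cons_prefix_cons] at hp
          rw [show (x0 :: x'').head (by simp) = x0 from rfl] at hh
          rw [hp.1] at hh
          rw [hh] at hqa
          exact Bool.false_ne_true hqa
      · exact ih hi
    · rw [List.dropWhile_cons_of_neg hqa]; exact h

lemma infix_strip (x : List Char) (hne : x ≠ [])
    (hh : PySem.Chars.isspace (x.head hne) = false)
    (hl : PySem.Chars.isspace (x.getLast hne) = false)
    (u : List Char) (h : x <:+: u) : x <:+: PySem.Chars.strip u := by
  rw [strip_as_drops]
  have h1 : x <:+: List.dropWhile PySem.Chars.isspace u := infix_dropWhileX _ x hne hh u h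
  show x <:+: List.rdropWhile PySem.Chars.isspace (List.dropWhile PySem.Chars.isspace u)
  rw [List.rdropWhile]
  rw [← List.reverse_infix, List.reverse_reverse]
  have hner : x.reverse ≠ [] := by simpa using hne
  apply infix_dropWhileX PySem.Chars.isspace x.reverse hner
    (by rw [List.head_reverse]; exact hl)
  exact List.reverse_infix.mpr h1

-- per-element equality of the two ports' element transforms
lemma elemA_eq (a : String) :
    PySem.Str.replace
      (PySem.Str.strip (PySem.Str.replace
        (PySem.Str.strip (PySem.Str.replace
          (PySem.Str.strip (PySem.Str.replace
            (PySem.Str.strip (PySem.Str.replace (PySem.Str.strip a) "&#39;" "\u0027"))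
            "&#8212;" "\u2014"))
          "&#38;" "\u0026"))
        "&#47;" "\u002F"))
      "&#34;" "\u0022" =
    String.ofList (chainA (PySem.Chars.strip a.toList)) := by
  unfold PySem.Str.replace PySem.Str.strip
  simp only [String.toList_ofList]
  rw [replace_eq_repl _ _ _ (by simp [tl39]), replace_eq_repl _ _ _ (by simp [tl8212]),
    replace_eq_repl _ _ _ (by simp [tl38]), replace_eq_repl _ _ _ (by simp [tl47]),
    replace_eq_repl _ _ _ (by simp [tl34])]
  simp only [tl39, tl8212, tl38, tl47, tl34, tlA, tlB, tlC, tlD, tlE]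
  rw [repl_stripped _ _ (by decide) _ (strip_strip a.toList)]
  rw [repl_stripped _ _ (by decide) _ (repl_stripped _ _ (by decide) _ (strip_strip a.toList))]
  rw [repl_stripped _ _ (by decide) _ (repl_stripped _ _ (by decide) _
    (repl_stripped _ _ (by decide) _ (strip_strip a.toList)))]
  rw [repl_stripped _ _ (by decide) _ (repl_stripped _ _ (by decide) _
    (repl_stripped _ _ (by decide) _ (repl_stripped _ _ (by decide) _ (strip_strip a.toList))))]
  rfl

-- per-element equality of the two ports' element transforms outside the change region
lemma elem_eq (a : String)
    (h47 : ¬ ['&','#','3','8',';','#','4','7',';'] <:+: a.toList)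
    (h34 : ¬ ['&','#','3','8',';','#','3','4',';'] <:+: a.toList) :
    PySem.Str.replace
      (PySem.Str.strip (PySem.Str.replace
        (PySem.Str.strip (PySem.Str.replace
          (PySem.Str.strip (PySem.Str.replace
            (PySem.Str.strip (PySem.Str.replace (PySem.Str.strip a) "&#39;" "\u0027"))
            "&#8212;" "\u2014"))
          "&#38;" "\u0026"))
        "&#47;" "\u002F"))
      "&#34;" "\u0022" =
    String.ofList (scanB (PySem.Chars.strip a.toList)) := by
  rw [elemA_eq]
  exact congrArg String.ofList (chain_eq_scan _
    (fun h => h47 (h.trans (strip_infix a.toList)))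
    (fun h => h34 (h.trans (strip_infix a.toList))))

-- ===== VERDICT (by name: the statement is the Claim_ definition above) =====
theorem fix_symbol_py_spec : Claim_unchanged_fix_symbol_py := by
  unfold Claim_unchanged_fix_symbol_py
  intro item _ hD
  simp only [fix_symbol_py, fix_symbol_py_alt]
  rw [show (PySem.Dict.ofList
      [("&#39;", "\u0027"), ("&#8212;", "\u2014"), ("&#38;", "\u0026"),
       ("&#47;", "\u002F"), ("&#34;", "\u0022")]).items =
      [("&#39;", "\u0027"), ("&#8212;", "\u2014"), ("&#38;", "\u0026"),
       ("&#47;", "\u002F"), ("&#34;", "\u0022")] from rfl]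
  simp only [List.foldl, List.map_map]
  apply List.map_congr_left
  intro a ha
  have hnb : ¬ ("&#38;#47;".toList <:+: a.toList ∨ "&#38;#34;".toList <:+: a.toList) := by
    intro h
    exact hD ⟨a, ha, h⟩
  push_neg at hnb
  exact elem_eq a (by simpa using hnb.1) (by simpa using hnb.2)

set_option maxRecDepth 10000 in
theorem fix_symbol_py_changed : Claim_changed_fix_symbol_py := by
  unfold Claim_changed_fix_symbol_py
  refine ⟨by decide, by decide, by rfl, ?_, ?_⟩
  · show fix_symbol_py_alt pvDiffWitness_fix_symbol_py = pvDiffWitnessOut_fix_symbol_py.2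
    unfold fix_symbol_py_alt pvDiffWitness_fix_symbol_py pvDiffWitnessOut_fix_symbol_py
    simp only [List.map]
    congr 1
    rw [← String.toList_inj, String.toList_ofList]
    rw [show PySem.Chars.strip "&#38;#47;".toList = ['&','#','3','8',';','#','4','7',';'] from rfl]
    simp [scanB]
  · intro h
    have := congrArg (fun l => l.map String.toList) h
    simp [pvDiffWitnessOut_fix_symbol_py] at this

theorem fix_symbol_py_tight : Claim_exact_fix_symbol_py := by
  unfold Claim_exact_fix_symbol_py
  intro item _ hD hEq
  obtain ⟨a, ha, hbad⟩ := hD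
  simp only [fix_symbol_py, fix_symbol_py_alt] at hEq
  rw [show (PySem.Dict.ofList
      [("&#39;", "\u0027"), ("&#8212;", "\u2014"), ("&#38;", "\u0026"),
       ("&#47;", "\u002F"), ("&#34;", "\u0022")]).items =
      [("&#39;", "\u0027"), ("&#8212;", "\u2014"), ("&#38;", "\u0026"),
       ("&#47;", "\u002F"), ("&#34;", "\u0022")] from rfl] at hEq
  simp only [List.foldl, List.map_map] at hEq
  have hpt : PySem.Str.replace
      (PySem.Str.strip (PySem.Str.replace
        (PySem.Str.strip (PySem.Str.replace
          (PySem.Str.strip (PySem.Str.replace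
            (PySem.Str.strip (PySem.Str.replace (PySem.Str.strip a) "&#39;" "\u0027"))
            "&#8212;" "\u2014"))
          "&#38;" "\u0026"))
        "&#47;" "\u002F"))
      "&#34;" "\u0022" =
      String.ofList (scanB (PySem.Chars.strip a.toList)) :=
    List.map_inj_left.mp hEq a ha
  rw [elemA_eq] at hpt
  have hlist := congrArg String.toList hpt
  simp only [String.toList_ofList] at hlist
  have hlen := congrArg List.length hlist
  have hlt := chain_lt (PySem.Chars.strip a.toList) ?_
  · omega
  · rcases hbad with h | h
    · exact Or.inl (infix_strip _ (by decide) (by decide) (by decide) _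
        (by rw [show ("&#38;#47;".toList : List Char) =
          ['&','#','3','8',';','#','4','7',';'] from rfl] at h; exact h))
    · exact Or.inr (infix_strip _ (by decide) (by decide) (by decide) _
        (by rw [show ("&#38;#34;".toList : List Char) =
          ['&','#','3','8',';','#','3','4',';'] from rfl] at h; exact h))
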